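-- pv_equiv track=rewrite | github.com/qiaoguanren/TrafficGamer | visualization/av2_vis.py | continuous_valid_length
-- ===== SOURCE A (Python) =====
-- def continuous_valid_length(valid_mask):
--     max_length = 0
--     current_length = 0
--
--     for is_valid in valid_mask:
--         if is_valid:
--             current_length += 1
--         else:
--             if current_length > max_length:
--                 max_length = current_length
--             current_length = 0
--
--     if current_length > max_length:
--         max_length = current_length
--
--     return max_length
-- ===== SOURCE B (Python) =====
-- def continuous_valid_length(valid_mask):
--     best = 0
--     i = 0
--     n = len(valid_mask)
--     while i < n:
--         j = i
--         while j < n and bool(valid_mask[j]) == bool(valid_mask[i]):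
--             j += 1
--         if valid_mask[i]:
--             best = max(best, j - i)
--         i = j
--     return best
-- ===== Notes on version B (the rewrite author's own statement) =====
-- stated objective: alternative
-- what changed: Replaces A's running counter with per-element reset by a group-then-reduce two-pointer scan: each maximal run of equal truthiness is measured in one inner advance and only truthy runs are max-reduced.
import Mathlib
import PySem

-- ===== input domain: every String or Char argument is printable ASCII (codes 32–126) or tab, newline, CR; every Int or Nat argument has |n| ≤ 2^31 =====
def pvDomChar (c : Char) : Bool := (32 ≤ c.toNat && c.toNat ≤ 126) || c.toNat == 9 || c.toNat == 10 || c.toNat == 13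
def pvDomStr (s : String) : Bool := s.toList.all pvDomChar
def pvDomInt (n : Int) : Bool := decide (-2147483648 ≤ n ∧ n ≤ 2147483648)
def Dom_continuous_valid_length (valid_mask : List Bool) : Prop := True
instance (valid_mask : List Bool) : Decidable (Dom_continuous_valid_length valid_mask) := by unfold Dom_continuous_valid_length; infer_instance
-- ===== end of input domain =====

-- B replaces A's running counter with a group-then-reduce two-pointer scan over maximal runs (alternative decomposition, same cost).

-- ===== PORT A =====
-- the loop body: carries (max_length, current_length)
def cvlStep (s : Int × Int) (v : Bool) : Int × Int :=
  if v then (s.1, s.2 + 1)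
  else if s.2 > s.1 then (s.2, 0) else (s.1, 0)

def continuous_valid_length (valid_mask : List Bool) : Int :=
  let s := valid_mask.foldl cvlStep (0, 0)
  if s.2 > s.1 then s.2 else s.1

-- ===== PORT B =====
-- Source B's outer while-loop: one maximal run (inner while = takeWhile count / dropWhile) per step, best accumulated
def cvlAltGo (best : Int) : List Bool → Int
  | [] => best
  | x :: xs =>
    let run : Int := ((xs.takeWhile (· == x)).length : Int) + 1
    let rest := xs.dropWhile (· == x)
    cvlAltGo (if x then max best run else best) rest
termination_by l => l.length
decreasing_by
  simpa using Nat.lt_succ_of_le (List.length_dropWhile_le _ _)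

def continuous_valid_length_alt (valid_mask : List Bool) : Int :=
  cvlAltGo 0 valid_mask

-- ===== PRECONDITION & SPEC =====
def Spec_continuous_valid_length (valid_mask : List Bool) (out : Int) : Prop := out = continuous_valid_length_alt valid_mask
instance (valid_mask : List Bool) (out : Int) : Decidable (Spec_continuous_valid_length valid_mask out) := by unfold Spec_continuous_valid_length; infer_instance

-- ===== CLAIM (what is proved, stated in full; the proofs are below) =====
def Claim_equal_continuous_valid_length : Prop := ∀ (valid_mask : List Bool), Dom_continuous_valid_length valid_mask → Spec_continuous_valid_length valid_mask (continuous_valid_length valid_mask)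

-- ===== LEMMAS AND PROOFS =====

-- A's computation from an arbitrary state (max_length = m, current_length = c)
def cvlF (l : List Bool) (m c : Int) : Int :=
  let s := l.foldl cvlStep (m, c)
  if s.2 > s.1 then s.2 else s.1

theorem cvlF_nil (m c : Int) : cvlF [] m c = max m c := by
  simp only [cvlF, List.foldl_nil]
  omega

theorem cvlF_true (l : List Bool) (m c : Int) : cvlF (true :: l) m c = cvlF l m (c + 1) := by
  simp [cvlF, cvlStep]

theorem cvlF_false (l : List Bool) (m c : Int) : cvlF (false :: l) m c = cvlF l (max m c) 0 := by
  have h : cvlStep (m, c) false = (max m c, 0) := by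
    simp only [cvlStep, Bool.false_eq_true, if_false]
    split <;> simp <;> try omega
  simp [cvlF, h]

theorem cvlF_factor : ∀ (l : List Bool) (m c : Int), 0 ≤ c → cvlF l m c = max m (cvlF l 0 c) := by
  intro l
  induction l with
  | nil => intro m c hc; rw [cvlF_nil, cvlF_nil]; omega
  | cons x xs ih =>
    intro m c hc
    cases x with
    | true =>
      rw [cvlF_true, cvlF_true, ih m (c + 1) (by omega), ih 0 (c + 1) (by omega)]
      try omega
    | false =>
      rw [cvlF_false, cvlF_false, ih (max m c) 0 le_rfl, ih (max 0 c) 0 le_rfl]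
      omega

theorem cvlF_true_run : ∀ (t : List Bool), (∀ a ∈ t, a = true) → ∀ (r : List Bool) (m c : Int),
    cvlF (t ++ r) m c = cvlF r m (c + t.length) := by
  intro t
  induction t with
  | nil => intro _ r m c; simp
  | cons a u ih =>
    intro h r m c
    have ha : a = true := h a (List.mem_cons_self ..)
    subst ha
    rw [List.cons_append, cvlF_true, ih (fun b hb => h b (List.mem_cons_of_mem _ hb)) r m (c + 1)]
    congr 1
    simp only [List.length_cons, Nat.cast_add, Nat.cast_one]
    ring

theorem cvlF_false_run : ∀ (t : List Bool), (∀ a ∈ t, a = false) → ∀ (r : List Bool),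
    cvlF (t ++ r) 0 0 = cvlF r 0 0 := by
  intro t
  induction t with
  | nil => intro _ r; simp
  | cons a u ih =>
    intro h r
    have ha : a = false := h a (List.mem_cons_self ..)
    subst ha
    rw [List.cons_append, cvlF_false]
    simpa using ih (fun b hb => h b (List.mem_cons_of_mem _ hb)) r

theorem cvlF_reset (r : List Bool) (c : Int) (hc : 0 ≤ c)
    (h : r = [] ∨ r.head? = some false) : cvlF r 0 c = max c (cvlF r 0 0) := by
  rcases h with h | h
  · subst h; rw [cvlF_nil, cvlF_nil]; omega
  · cases r with
    | nil => simp at h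
    | cons y ys =>
      have hy : y = false := by simpa using h
      subst hy
      rw [cvlF_false, cvlF_false]
      rw [cvlF_factor ys (max 0 c) 0 le_rfl, cvlF_factor ys (max 0 0) 0 le_rfl]
      omega

theorem dropWhile_head (p : Bool → Bool) : ∀ (l : List Bool),
    l.dropWhile p = [] ∨ ∃ y ys, l.dropWhile p = y :: ys ∧ p y = false := by
  intro l
  induction l with
  | nil => left; rfl
  | cons a u ih =>
    by_cases hp : p a = true
    · simpa [List.dropWhile_cons, hp] using ih
    · right
      exact ⟨a, u, by simp [hp], by simpa using hp⟩

theorem cvlAltGo_nonneg : ∀ (n : Nat) (l : List Bool), l.length ≤ n →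
    ∀ (best : Int), best ≤ cvlAltGo best l := by
  intro n
  induction n with
  | zero =>
    intro l hl best
    have : l = [] := List.length_eq_zero_iff.mp (Nat.le_zero.mp hl)
    subst this; rw [cvlAltGo]
  | succ n ih =>
    intro l hl best
    cases l with
    | nil => rw [cvlAltGo]
    | cons x xs =>
      rw [cvlAltGo]
      have hlen : (xs.dropWhile (· == x)).length ≤ n :=
        le_trans (List.length_dropWhile_le _ _) (by simpa using hl)
      calc best ≤ (if x then max best (((xs.takeWhile (· == x)).length : Int) + 1) else best) := by
            split <;> omega
        _ ≤ _ := ih _ hlen _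

theorem cvlAltGo_factor : ∀ (n : Nat) (l : List Bool), l.length ≤ n →
    ∀ (best : Int), 0 ≤ best → cvlAltGo best l = max best (cvlAltGo 0 l) := by
  intro n
  induction n with
  | zero =>
    intro l hl best hb
    have : l = [] := List.length_eq_zero_iff.mp (Nat.le_zero.mp hl)
    subst this
    rw [cvlAltGo, cvlAltGo]; omega
  | succ n ih =>
    intro l hl best hb
    cases l with
    | nil => rw [cvlAltGo, cvlAltGo]; omega
    | cons x xs =>
      have hlen : (xs.dropWhile (· == x)).length ≤ n :=
        le_trans (List.length_dropWhile_le _ _) (by simpa using hl)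
      have hpos : (0 : Int) ≤ ((xs.takeWhile (· == x)).length : Int) + 1 := by positivity
      have hnn := cvlAltGo_nonneg n (xs.dropWhile (· == x)) hlen 0
      rw [cvlAltGo, cvlAltGo]
      cases x with
      | true =>
        simp only [if_true]
        have h1 := ih _ hlen (max best (((xs.takeWhile (· == true)).length : Int) + 1)) (by omega)
        have h2 := ih _ hlen (max 0 (((xs.takeWhile (· == true)).length : Int) + 1)) (by omega)
        rw [h1, h2]
        omega
      | false =>
        simp only [Bool.false_eq_true, if_false]
        rw [ih _ hlen _ hb]
        try omega

theorem cvl_main : ∀ (n : Nat) (l : List Bool), l.length ≤ n →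
    cvlF l 0 0 = cvlAltGo 0 l := by
  intro n
  induction n with
  | zero =>
    intro l hl
    have hnil : l = [] := List.length_eq_zero_iff.mp (Nat.le_zero.mp hl)
    subst hnil
    rw [cvlF_nil, cvlAltGo]; omega
  | succ n ih =>
    intro l hl
    cases l with
    | nil => rw [cvlF_nil, cvlAltGo]; omega
    | cons x xs =>
      have hsplit : xs.takeWhile (· == x) ++ xs.dropWhile (· == x) = xs :=
        List.takeWhile_append_dropWhile
      have hlen : (xs.dropWhile (· == x)).length ≤ n :=
        le_trans (List.length_dropWhile_le _ _) (by simpa using hl)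
      have ihr := ih _ hlen
      rw [cvlAltGo]
      cases x with
      | true =>
        have ht : ∀ a ∈ xs.takeWhile (· == true), a = true := by
          intro a ha
          simpa using List.mem_takeWhile_imp ha
        have hhead : xs.dropWhile (· == true) = [] ∨
            (xs.dropWhile (· == true)).head? = some false := by
          rcases dropWhile_head (· == true) xs with h | ⟨y, ys, hy, hpy⟩
          · left; exact h
          · right; rw [hy]; simp at hpy; simp [hpy]
        have hrun := cvlF_true_run (xs.takeWhile (· == true)) ht (xs.dropWhile (· == true)) 0 1
        rw [hsplit] at hrun
        rw [cvlF_true, zero_add, hrun, cvlF_reset _ _ (by positivity) hhead, ihr]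
        rw [if_pos rfl]
        have h2 := cvlAltGo_factor n _ hlen
          (max 0 (((xs.takeWhile (· == true)).length : Int) + 1)) (by positivity)
        rw [h2]
        omega
      | false =>
        have hf : ∀ a ∈ xs.takeWhile (· == false), a = false := by
          intro a ha
          simpa using List.mem_takeWhile_imp ha
        have hrun := cvlF_false_run (xs.takeWhile (· == false)) hf (xs.dropWhile (· == false))
        rw [hsplit] at hrun
        rw [cvlF_false, show max (0:Int) 0 = 0 from by omega, hrun, ihr]
        simp

-- ===== VERDICT (by name: the statement is the Claim_ definition above) =====
theorem continuous_valid_length_spec : Claim_equal_continuous_valid_length := by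
  intro l _
  show continuous_valid_length l = continuous_valid_length_alt l
  exact cvl_main l.length l le_rfl
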